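-- pv_equiv track=rewrite | github.com/Eveningg/LeetCodePractice | 1967-number-of-strings-that-appear-as-substrings-in-word/1967-number-of-strings-that-appear-as-substrings-in-word.py | numOfStrings
-- ===== SOURCE A (Python) =====
-- from typing import List
--
-- def numOfStrings(patterns: List[str], word: str) -> int:
--
--     # O(N) solution
--
--     count=0
--
--     for i in patterns:
--         if i in word:
--             count += 1
--
--     return count
--
--
--
--     substrings = []
--     total = 0
--
--     # brute-force solution
--     for i in range(len(word)):
--
--         for j in range(i+1,len(word)+1):
--             substrings.append(word[i:j])
--
--     for pattern in patterns:
--         if pattern in substrings: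
--             total += 1
--
--     return total
-- ===== SOURCE B (Python) =====
-- def numOfStrings(patterns, word):
--     # Hash every window of word whose length occurs among the patterns,
--     # then answer each pattern by one set lookup.
--     n = len(word)
--     windows = set()
--     for L in set(len(p) for p in patterns):
--         for i in range(n - L + 1):
--             windows.add(word[i:i + L])
--     return sum(1 for p in patterns if p in windows)
-- ===== Notes on version B (the rewrite author's own statement) =====
-- stated objective: faster
-- what changed: Instead of running the built-in substring search of word for every pattern, B builds once a hash set of all windows of word whose lengths occur among the patterns, then answers each pattern by a single set lookup.
import Mathlib
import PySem

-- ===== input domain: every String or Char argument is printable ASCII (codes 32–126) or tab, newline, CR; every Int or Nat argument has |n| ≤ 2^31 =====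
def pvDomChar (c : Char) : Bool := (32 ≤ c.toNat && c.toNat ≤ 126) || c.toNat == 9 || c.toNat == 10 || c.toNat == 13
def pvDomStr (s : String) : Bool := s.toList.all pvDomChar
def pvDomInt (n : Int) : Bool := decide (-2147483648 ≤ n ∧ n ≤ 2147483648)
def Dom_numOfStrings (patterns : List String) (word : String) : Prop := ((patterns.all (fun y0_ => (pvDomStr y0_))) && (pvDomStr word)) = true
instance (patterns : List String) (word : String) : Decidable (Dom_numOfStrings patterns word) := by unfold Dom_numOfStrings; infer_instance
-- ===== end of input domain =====

-- B builds a set of all windows of word whose lengths occur among the patterns and answers each pattern by a set lookup, instead of A's per-pattern substring search.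
-- ===== PORT A =====
-- count = 0; for i in patterns: if i in word: count += 1; return count
def numOfStrings (patterns : List String) (word : String) : Int :=
  patterns.foldl (fun count i => if PySem.Str.isIn i word then count + 1 else count) 0

-- ===== PORT B =====
-- for L in set(len(p) for p in patterns): for i in range(n-L+1): windows.add(word[i:i+L])
def nosWindows (w : List Char) (lens : PySem.Set Int) : PySem.Set (List Char) :=
  lens.foldl (fun ws L =>
    (PySem.List.pyRange 0 ((w.length : Int) - L + 1) 1).foldl
      (fun ws i => PySem.Set.add ws (PySem.List.slice w (some i) (some (i + L)))) ws)
    PySem.Set.empty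

-- return sum(1 for p in patterns if p in windows)
def numOfStrings_alt (patterns : List String) (word : String) : Int :=
  let w := word.toList
  let lens : PySem.Set Int := PySem.Set.ofList (patterns.map (fun p => (p.toList.length : Int)))
  let windows := nosWindows w lens
  patterns.foldl (fun acc p => if PySem.Set.contains windows p.toList then acc + 1 else acc) 0

-- ===== PRECONDITION & SPEC =====
def Spec_numOfStrings (patterns : List String) (word : String) (out : Int) : Prop := out = numOfStrings_alt patterns word
instance (patterns : List String) (word : String) (out : Int) : Decidable (Spec_numOfStrings patterns word out) := by unfold Spec_numOfStrings; infer_instance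

-- ===== CLAIM (what is proved, stated in full; the proofs are below) =====
def Claim_equal_numOfStrings : Prop := ∀ (patterns : List String) (word : String), Dom_numOfStrings patterns word → Spec_numOfStrings patterns word (numOfStrings patterns word)

-- ===== LEMMAS AND PROOFS =====

lemma mem_nosWindows_aux (w : List Char) (lens : List Int) (ws : PySem.Set (List Char)) (x : List Char) :
    x ∈ lens.foldl (fun ws L =>
      (PySem.List.pyRange 0 ((w.length : Int) - L + 1) 1).foldl
        (fun ws i => PySem.Set.add ws (PySem.List.slice w (some i) (some (i + L)))) ws) ws ↔
      x ∈ ws ∨ ∃ L ∈ lens, ∃ i, i ∈ PySem.List.pyRange 0 ((w.length : Int) - L + 1) 1 ∧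
        x = PySem.List.slice w (some i) (some (i + L)) := by
  induction lens generalizing ws with
  | nil => simp
  | cons L rest ih =>
    simp only [List.foldl_cons, ih, PySem.Set.mem_foldl_add, List.mem_cons]
    constructor
    · rintro ((h | ⟨i, hi, rfl⟩) | ⟨M, hM, i, hi, rfl⟩)
      · exact Or.inl h
      · exact Or.inr ⟨L, Or.inl rfl, i, hi, rfl⟩
      · exact Or.inr ⟨M, Or.inr hM, i, hi, rfl⟩
    · rintro (h | ⟨M, (rfl | hM), i, hi, rfl⟩)
      · exact Or.inl (Or.inl h)
      · exact Or.inl (Or.inr ⟨i, hi, rfl⟩)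
      · exact Or.inr ⟨M, hM, i, hi, rfl⟩

lemma contains_windows_eq_isIn (patterns : List String) (word : String) (p : String)
    (hp : p ∈ patterns) :
    PySem.Set.contains
      (nosWindows word.toList (PySem.Set.ofList (patterns.map (fun q => (q.toList.length : Int)))))
      p.toList = PySem.Str.isIn p word := by
  have hiff : p.toList ∈ nosWindows word.toList
      (PySem.Set.ofList (patterns.map (fun q => (q.toList.length : Int)))) ↔
      p.toList <:+: word.toList := by
    rw [nosWindows, mem_nosWindows_aux]
    constructor
    · rintro (h | ⟨L, hL, i, hi, hx⟩)
      · simp [PySem.Set.empty] at h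
      · rw [PySem.Set.mem_ofList, List.mem_map] at hL
        obtain ⟨q, -, rfl⟩ := hL
        rw [PySem.List.mem_pyRange_one] at hi
        have h0 : (0:Int) ≤ i := hi.1
        have hL0 : (0:Int) ≤ i + q.toList.length := by positivity
        rw [PySem.List.slice_toNat _ h0 hL0] at hx
        rw [hx]
        exact ((word.toList.drop i.toNat).take_prefix _).isInfix.trans
          (word.toList.drop_suffix i.toNat).isInfix
    · rintro ⟨s₁, s₂, hw⟩
      right
      refine ⟨(p.toList.length : Int), ?_, (s₁.length : Int), ?_, ?_⟩
      · rw [PySem.Set.mem_ofList, List.mem_map]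
        exact ⟨p, hp, rfl⟩
      · rw [PySem.List.mem_pyRange_one]
        constructor
        · positivity
        · have : word.toList.length = s₁.length + p.toList.length + s₂.length := by
            rw [← hw]; simp; omega
          omega
      · have : (s₁.length : Int) + (p.toList.length : Int) = ((s₁.length + p.toList.length : Nat) : Int) := by push_cast; ring
        rw [this, PySem.List.slice_natCast]
        rw [← hw]
        simp
  have hb : PySem.Str.isIn p word = true ↔ p.toList <:+: word.toList := by
    simp [PySem.Chars.isIn_iff_infix]
  rw [Bool.eq_iff_iff, PySem.Set.contains_iff, hb]
  exact hiff

-- ===== VERDICT (by name: the statement is the Claim_ definition above) =====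
theorem numOfStrings_spec : Claim_equal_numOfStrings := by
  intro patterns word _
  unfold Spec_numOfStrings numOfStrings numOfStrings_alt
  rw [PySem.List.foldl_if_add_one, PySem.List.foldl_if_add_one]
  congr 2
  exact (List.countP_congr (fun p hp => by
    rw [contains_windows_eq_isIn patterns word p hp])).symm
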